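-- pv_equiv track=rewrite | github.com/EDAII/Lista1_IgorAraujo_Daniel | __init__.py | sentry_sequence_search
-- ===== SOURCE A (Python) =====
-- def fill_vector_order(total_numbers):
--     vector = list(range(0,total_numbers + 1))
--     return vector
--
-- def sentry_sequence_search(valor_a_ser_encontrado,total_numbers):
--     vector = fill_vector_order(total_numbers)
--     i = 0
--     vector.append(valor_a_ser_encontrado)
--     while vector[i] != valor_a_ser_encontrado:
--         i += 1
--     if i == len(vector) - 1:
--         return "Não foi possível encontrar o elemento {}".format(valor_a_ser_encontrado)
--     return "O elemento {} foi encontrado na posição {}".format(valor_a_ser_encontrado, i)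
-- ===== SOURCE B (Python) =====
-- def sentry_sequence_search(valor_a_ser_encontrado, total_numbers):
--     if 0 <= valor_a_ser_encontrado <= total_numbers:
--         return "O elemento {} foi encontrado na posição {}".format(
--             valor_a_ser_encontrado, valor_a_ser_encontrado)
--     return "Não foi possível encontrar o elemento {}".format(valor_a_ser_encontrado)
-- ===== Notes on version B (the rewrite author's own statement) =====
-- stated objective: faster
-- what changed: The vector is just [0..total_numbers], so the element is found exactly when 0 <= value <= total_numbers and its position equals the value; B replaces building the list and the sentinel scan with that O(1) index check.
import Mathlib
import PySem

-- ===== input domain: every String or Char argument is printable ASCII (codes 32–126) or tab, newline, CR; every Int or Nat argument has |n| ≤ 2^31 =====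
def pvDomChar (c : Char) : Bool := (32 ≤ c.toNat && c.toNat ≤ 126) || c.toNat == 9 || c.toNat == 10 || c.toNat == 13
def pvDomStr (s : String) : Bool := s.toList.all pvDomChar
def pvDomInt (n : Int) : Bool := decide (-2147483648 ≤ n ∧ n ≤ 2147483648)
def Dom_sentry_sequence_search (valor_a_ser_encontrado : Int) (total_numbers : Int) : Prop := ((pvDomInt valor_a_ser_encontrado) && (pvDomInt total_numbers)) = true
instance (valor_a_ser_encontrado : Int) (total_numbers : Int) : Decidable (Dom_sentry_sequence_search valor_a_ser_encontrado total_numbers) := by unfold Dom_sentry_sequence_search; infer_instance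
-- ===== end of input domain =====

-- B replaces A's list construction + sentinel scan by the O(1) observation that the
-- vector is [0..total_numbers], so the element is found iff 0 ≤ v ≤ total_numbers, at position v.

-- ===== PORT A =====
-- the 'while vector[i] != valor' loop: recursion over the remaining list, carrying the index i
def searchLoopA (v : Int) : List Int → Nat → Nat
  | [], i => i
  | x :: rest, i => if x = v then i else searchLoopA v rest (i + 1)

def sentry_sequence_search (valor_a_ser_encontrado : Int) (total_numbers : Int) : String :=
  let vector := PySem.List.pyRange 0 (total_numbers + 1) 1 ++ [valor_a_ser_encontrado]
  let i := searchLoopA valor_a_ser_encontrado vector 0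
  if (i : Int) = PySem.List.len vector - 1 then
    "Não foi possível encontrar o elemento " ++ PySem.Int.toStr valor_a_ser_encontrado
  else
    "O elemento " ++ PySem.Int.toStr valor_a_ser_encontrado ++ " foi encontrado na posição " ++ PySem.Int.toStr (i : Int)

-- ===== PORT B =====
def sentry_sequence_search_alt (valor_a_ser_encontrado : Int) (total_numbers : Int) : String :=
  if 0 ≤ valor_a_ser_encontrado ∧ valor_a_ser_encontrado ≤ total_numbers then
    "O elemento " ++ PySem.Int.toStr valor_a_ser_encontrado ++ " foi encontrado na posição " ++ PySem.Int.toStr valor_a_ser_encontrado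
  else
    "Não foi possível encontrar o elemento " ++ PySem.Int.toStr valor_a_ser_encontrado

-- ===== PRECONDITION & SPEC =====
def Spec_sentry_sequence_search (valor_a_ser_encontrado : Int) (total_numbers : Int) (out : String) : Prop := out = sentry_sequence_search_alt valor_a_ser_encontrado total_numbers
instance (valor_a_ser_encontrado : Int) (total_numbers : Int) (out : String) : Decidable (Spec_sentry_sequence_search valor_a_ser_encontrado total_numbers out) := by unfold Spec_sentry_sequence_search; infer_instance

-- ===== CLAIM (what is proved, stated in full; the proofs are below) =====
def Claim_equal_sentry_sequence_search : Prop := ∀ (valor_a_ser_encontrado : Int) (total_numbers : Int), Dom_sentry_sequence_search valor_a_ser_encontrado total_numbers → Spec_sentry_sequence_search valor_a_ser_encontrado total_numbers (sentry_sequence_search valor_a_ser_encontrado total_numbers)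

-- ===== LEMMAS AND PROOFS =====

-- the sentinel scan over range(a,b) ++ [v] stops at v-a if a ≤ v < b, else at the sentinel
lemma searchLoopA_range (v : Int) : ∀ (n : Nat) (a b : Int) (i : Nat), (b - a).toNat = n →
    searchLoopA v (PySem.List.pyRange a b 1 ++ [v]) i =
      if a ≤ v ∧ v < b then i + (v - a).toNat else i + n := by
  intro n
  induction n with
  | zero =>
    intro a b i h
    rw [PySem.List.pyRange_one_eq_nil (by omega)]
    rw [if_neg (by omega : ¬(a ≤ v ∧ v < b))]
    simp [searchLoopA]
  | succ m ih =>
    intro a b i h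
    rw [PySem.List.pyRange_one_cons (by omega)]
    simp only [List.cons_append, searchLoopA]
    by_cases hv : a = v
    · subst hv
      rw [if_pos rfl, if_pos ⟨le_refl _, by omega⟩]
      omega
    · rw [if_neg hv, ih (a + 1) b (i + 1) (by omega)]
      split_ifs with h1 h2 h2 <;> omega

theorem sentry_sequence_search_eq (v tn : Int) :
    sentry_sequence_search v tn = sentry_sequence_search_alt v tn := by
  simp only [sentry_sequence_search, sentry_sequence_search_alt]
  rw [searchLoopA_range v (tn + 1 - 0).toNat 0 (tn + 1) 0 rfl]
  have hlen : PySem.List.len (PySem.List.pyRange 0 (tn + 1) 1 ++ [v]) = ((tn + 1 - 0).toNat : Int) + 1 := by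
    simp [PySem.List.len_eq, PySem.List.length_pyRange_one]
  rw [hlen]
  by_cases h : 0 ≤ v ∧ v ≤ tn
  · rw [if_pos (show 0 ≤ v ∧ v < tn + 1 by omega), if_pos h, if_neg (by omega)]
    have hv : ((0 + (v - 0).toNat : Nat) : Int) = v := by omega
    rw [hv]
  · rw [if_neg (show ¬(0 ≤ v ∧ v < tn + 1) by omega), if_neg h, if_pos (by omega)]

-- ===== VERDICT (by name: the statement is the Claim_ definition above) =====
theorem sentry_sequence_search_spec : Claim_equal_sentry_sequence_search := by
  intro v tn _
  unfold Spec_sentry_sequence_search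
  exact sentry_sequence_search_eq v tn
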